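-- pv_equiv track=rewrite | github.com/Demothedread/lawyerfactory | src/lawyerfactory/knowledge_graph/integrations/integration.py | _generate_procedural_checklist
-- ===== SOURCE A (Python) =====
-- from typing import Any, Dict, List, Optional
--
-- def _generate_procedural_checklist(
--     case_foundation: Dict[str, Any]
-- ) -> List[Dict[str, Any]]:
--     """Generate procedural requirements checklist"""
--     procedural_reqs = case_foundation.get("procedural_checklist", [])
--
--     checklist = []
--     for req in procedural_reqs:
--         checklist.append(
--             {
--                 "requirement": req.get("requirement", ""),
--                 "type": req.get("type", ""),
--                 "urgency": req.get("urgency", "medium"),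
--                 "status": "pending",
--                 "notes": f"Identified from draft analysis - confidence: {req.get('confidence', 'unknown')}",
--             }
--         )
--
--     # Add standard procedural items
--     standard_items = [
--         {
--             "requirement": "File complaint within statute of limitations",
--             "type": "filing",
--             "urgency": "high",
--         },
--         {
--             "requirement": "Serve all defendants properly",
--             "type": "service",
--             "urgency": "high",
--         },
--         {
--             "requirement": "Complete initial discovery planning",
--             "type": "discovery",
--             "urgency": "medium",
--         },
--         {
--             "requirement": "Preserve relevant documents and evidence",
--             "type": "evidence",
--             "urgency": "high",
--         },
--     ]
--
--     for item in standard_items: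
--         if not any(
--             existing["requirement"] == item["requirement"] for existing in checklist
--         ):
--             checklist.append(
--                 {
--                     **item,
--                     "status": "pending",
--                     "notes": "Standard procedural requirement",
--                 }
--             )
--
--     return sorted(
--         checklist,
--         key=lambda x: {"high": 0, "medium": 1, "low": 2}[
--             x.get("urgency", "medium")
--         ],
--     )
-- ===== SOURCE B (Python) =====
-- from typing import Any, Dict, List, Optional
--
-- _STANDARD_ITEMS = [
--     {
--         "requirement": "File complaint within statute of limitations",
--         "type": "filing",
--         "urgency": "high",
--     },
--     {
--         "requirement": "Serve all defendants properly",
--         "type": "service",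
--         "urgency": "high",
--     },
--     {
--         "requirement": "Complete initial discovery planning",
--         "type": "discovery",
--         "urgency": "medium",
--     },
--     {
--         "requirement": "Preserve relevant documents and evidence",
--         "type": "evidence",
--         "urgency": "high",
--     },
-- ]
--
-- _RANK = {"high": 0, "medium": 1, "low": 2}
--
--
-- def _generate_procedural_checklist(
--     case_foundation: Dict[str, Any]
-- ) -> List[Dict[str, Any]]:
--     """Generate procedural requirements checklist"""
--     # Buckets replace the final sort: stable distribution by urgency rank.
--     buckets = ([], [], [])
--     seen = set()
--
--     for req in case_foundation.get("procedural_checklist", []):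
--         r = req.get("requirement", "")
--         item = {
--             "requirement": r,
--             "type": req.get("type", ""),
--             "urgency": req.get("urgency", "medium"),
--             "status": "pending",
--             "notes": f"Identified from draft analysis - confidence: {req.get('confidence', 'unknown')}",
--         }
--         buckets[_RANK[item["urgency"]]].append(item)
--         seen.add(r)
--
--     for item in _STANDARD_ITEMS:
--         if item["requirement"] not in seen:
--             buckets[_RANK[item["urgency"]]].append(
--                 {**item, "status": "pending", "notes": "Standard procedural requirement"}
--             )
--
--     return buckets[0] + buckets[1] + buckets[2]
-- ===== Notes on version B (the rewrite author's own statement) =====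
-- stated objective: alternative
-- what changed: Single construction pass appends each item directly into one of three urgency buckets (high/medium/low) and uses a seen-set of requirement strings instead of the inner any()-scan; the result is the bucket concatenation, replacing the final comparison sort entirely.
import Mathlib
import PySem

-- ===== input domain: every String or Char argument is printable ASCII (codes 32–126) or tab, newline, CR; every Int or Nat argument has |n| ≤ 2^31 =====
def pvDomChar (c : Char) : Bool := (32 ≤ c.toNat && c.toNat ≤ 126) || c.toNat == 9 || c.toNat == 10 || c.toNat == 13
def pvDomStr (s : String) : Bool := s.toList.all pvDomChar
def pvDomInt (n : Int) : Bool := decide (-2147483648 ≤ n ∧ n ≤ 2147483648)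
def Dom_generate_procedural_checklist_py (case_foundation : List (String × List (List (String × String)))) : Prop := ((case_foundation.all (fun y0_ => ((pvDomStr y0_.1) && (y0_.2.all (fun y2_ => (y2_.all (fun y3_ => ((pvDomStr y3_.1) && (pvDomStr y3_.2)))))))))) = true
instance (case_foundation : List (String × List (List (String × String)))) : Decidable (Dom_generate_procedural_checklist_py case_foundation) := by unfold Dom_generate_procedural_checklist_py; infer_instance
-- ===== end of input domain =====

-- B replaces the final stable sort by a one-pass three-bucket distribution and the inner
-- any()-scan by a seen-set of requirement strings; same return value on all inputs where A returns.

-- ===== PORT A =====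
-- {"high":0,"medium":1,"low":2}[u]; Python raises KeyError when u is none of the three keys —
-- Pre_ excludes that, so the default 3 is never reached under Pre_.
def pvRankA (u : String) : Int :=
  ((PySem.Dict.mk [("high", (0 : Int)), ("medium", 1), ("low", 2)]).get? u).getD 3

-- the dict literal built for each req: five distinct fresh keys, so it IS its association list (exact)
def pvItemA (req : PySem.Dict String String) : List (String × String) :=
  [("requirement", req.getD "requirement" ""),
   ("type", req.getD "type" ""),
   ("urgency", req.getD "urgency" "medium"),
   ("status", "pending"),
   ("notes", "Identified from draft analysis - confidence: " ++ req.getD "confidence" "unknown")]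

def pvStdA : List (List (String × String)) :=
  [[("requirement", "File complaint within statute of limitations"), ("type", "filing"), ("urgency", "high")],
   [("requirement", "Serve all defendants properly"), ("type", "service"), ("urgency", "high")],
   [("requirement", "Complete initial discovery planning"), ("type", "discovery"), ("urgency", "medium")],
   [("requirement", "Preserve relevant documents and evidence"), ("type", "evidence"), ("urgency", "high")]]

-- existing["requirement"] / item["requirement"] are ported as getD with "" — the key is always
-- present in these dicts, so Python's KeyError branch is unreachable.  {**item, "status": …,
-- "notes": …} appends two fresh keys to item's association list (exact).
def generate_procedural_checklist_py (case_foundation : List (String × List (List (String × String)))) : List (List (String × String)) :=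
  let procedural_reqs := (PySem.Dict.mk case_foundation).getD "procedural_checklist" []
  let checklist := procedural_reqs.foldl (fun acc req => acc ++ [pvItemA (PySem.Dict.mk req)]) []
  let checklist2 := pvStdA.foldl
    (fun acc item =>
      if acc.any (fun existing =>
            (PySem.Dict.mk existing).getD "requirement" "" == (PySem.Dict.mk item).getD "requirement" "") then
        acc
      else
        acc ++ [item ++ [("status", "pending"), ("notes", "Standard procedural requirement")]]) checklist
  PySem.List.sorted checklist2 (fun x => pvRankA ((PySem.Dict.mk x).getD "urgency" "medium")) false

-- ===== PORT B =====
def pvRankB (u : String) : Int :=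
  ((PySem.Dict.mk [("high", (0 : Int)), ("medium", 1), ("low", 2)]).get? u).getD 3

def pvItemB (req : PySem.Dict String String) : List (String × String) :=
  [("requirement", req.getD "requirement" ""),
   ("type", req.getD "type" ""),
   ("urgency", req.getD "urgency" "medium"),
   ("status", "pending"),
   ("notes", "Identified from draft analysis - confidence: " ++ req.getD "confidence" "unknown")]

def pvStdB : List (List (String × String)) :=
  [[("requirement", "File complaint within statute of limitations"), ("type", "filing"), ("urgency", "high")],
   [("requirement", "Serve all defendants properly"), ("type", "service"), ("urgency", "high")],
   [("requirement", "Complete initial discovery planning"), ("type", "discovery"), ("urgency", "medium")],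
   [("requirement", "Preserve relevant documents and evidence"), ("type", "evidence"), ("urgency", "high")]]

-- buckets[k].append(item); under Pre_ the rank k is 0, 1 or 2
def pvBucketPush (b : List (List (String × String)) × List (List (String × String)) × List (List (String × String)))
    (k : Int) (item : List (String × String)) :
    List (List (String × String)) × List (List (String × String)) × List (List (String × String)) :=
  if k == 0 then (b.1 ++ [item], b.2.1, b.2.2)
  else if k == 1 then (b.1, b.2.1 ++ [item], b.2.2)
  else (b.1, b.2.1, b.2.2 ++ [item])

def generate_procedural_checklist_py_alt (case_foundation : List (String × List (List (String × String)))) : List (List (String × String)) :=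
  let st := ((PySem.Dict.mk case_foundation).getD "procedural_checklist" []).foldl
    (fun (st : (List (List (String × String)) × List (List (String × String)) × List (List (String × String))) × PySem.Set String) req =>
      (pvBucketPush st.1 (pvRankB ((PySem.Dict.mk req).getD "urgency" "medium")) (pvItemB (PySem.Dict.mk req)),
       PySem.Set.add st.2 ((PySem.Dict.mk req).getD "requirement" "")))
    (([], [], []), PySem.Set.empty)
  let b := pvStdB.foldl
    (fun b item =>
      if PySem.Set.contains st.2 ((PySem.Dict.mk item).getD "requirement" "") then b
      else pvBucketPush b (pvRankB ((PySem.Dict.mk item).getD "urgency" "medium"))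
             (item ++ [("status", "pending"), ("notes", "Standard procedural requirement")]))
    st.1
  b.1 ++ b.2.1 ++ b.2.2

-- ===== PRECONDITION & SPEC =====
-- Pre_ excludes exactly the inputs where Python A raises KeyError: some req whose "urgency"
-- value (default "medium") is not one of "high"/"medium"/"low".
def Pre_generate_procedural_checklist_py (case_foundation : List (String × List (List (String × String)))) : Prop :=
  ∀ req ∈ (PySem.Dict.mk case_foundation).getD "procedural_checklist" [],
    (PySem.Dict.mk req).getD "urgency" "medium" ∈ (["high", "medium", "low"] : List String)
instance (case_foundation : List (String × List (List (String × String)))) : Decidable (Pre_generate_procedural_checklist_py case_foundation) := by unfold Pre_generate_procedural_checklist_py; infer_instance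

def pvWitness_generate_procedural_checklist_py : (List (String × List (List (String × String)))) :=
  [("procedural_checklist", [[("requirement", "a"), ("urgency", "low")]])]

def Spec_generate_procedural_checklist_py (case_foundation : List (String × List (List (String × String)))) (out : List (List (String × String))) : Prop := out = generate_procedural_checklist_py_alt case_foundation
instance (case_foundation : List (String × List (List (String × String)))) (out : List (List (String × String))) : Decidable (Spec_generate_procedural_checklist_py case_foundation out) := by unfold Spec_generate_procedural_checklist_py; infer_instance

-- ===== CLAIM (what is proved, stated in full; the proofs are below) =====
def Claim_equal_generate_procedural_checklist_py : Prop := ∀ (case_foundation : List (String × List (List (String × String)))), Dom_generate_procedural_checklist_py case_foundation → Pre_generate_procedural_checklist_py case_foundation → Spec_generate_procedural_checklist_py case_foundation (generate_procedural_checklist_py case_foundation)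

-- ===== LEMMAS AND PROOFS =====

theorem itemA_req (d : PySem.Dict String String) :
    (PySem.Dict.mk (pvItemA d)).getD "requirement" "" = d.getD "requirement" "" := rfl

theorem itemA_urg (d : PySem.Dict String String) :
    (PySem.Dict.mk (pvItemA d)).getD "urgency" "medium" = d.getD "urgency" "medium" := rfl

theorem rankB_eq : pvRankB = pvRankA := rfl
theorem itemB_eq : pvItemB = pvItemA := rfl
theorem stdB_eq : pvStdB = pvStdA := rfl
theorem rankA_high : pvRankA "high" = 0 := rfl
theorem rankA_medium : pvRankA "medium" = 1 := rfl
theorem rankA_low : pvRankA "low" = 2 := rfl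

theorem pvInsertBy_append {α : Type} (before : α → α → Bool) (x : α) (l1 l2 : List α)
    (h1 : ∀ b ∈ l1, before x b = false) (h2 : ∀ b ∈ l2, before x b = true) :
    PySem.List.insertBy before x (l1 ++ l2) = l1 ++ x :: l2 := by
  induction l1 with
  | nil =>
    cases l2 with
    | nil => rfl
    | cons h t => simp [PySem.List.insertBy, h2 h (by simp)]
  | cons a l1 ih =>
    simp only [List.cons_append, PySem.List.insertBy, h1 a (by simp)]
    simp [ih (fun b hb => h1 b (by simp [hb]))]

theorem pvSortedBuckets {α : Type} (key : α → Int) :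
    ∀ (xs a0 a1 a2 : List α),
      (∀ x ∈ xs, key x = 0 ∨ key x = 1 ∨ key x = 2) →
      (∀ b ∈ a0, key b = 0) → (∀ b ∈ a1, key b = 1) → (∀ b ∈ a2, key b = 2) →
      xs.foldl (fun acc x => PySem.List.insertBy (fun a b => decide (key a < key b)) x acc) (a0 ++ a1 ++ a2)
        = (a0 ++ xs.filter (fun x => key x == 0)) ++ (a1 ++ xs.filter (fun x => key x == 1)) ++ (a2 ++ xs.filter (fun x => key x == 2)) := by
  intro xs
  induction xs with
  | nil => intro a0 a1 a2 _ _ _ _; simp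
  | cons x xs ih =>
    intro a0 a1 a2 hx h0 h1 h2
    rcases hx x (by simp) with hk | hk | hk
    · have : PySem.List.insertBy (fun a b => decide (key a < key b)) x (a0 ++ a1 ++ a2)
          = (a0 ++ [x]) ++ a1 ++ a2 := by
        rw [List.append_assoc]
        rw [pvInsertBy_append _ x a0 (a1 ++ a2)
          (fun b hb => by simp [h0 b hb, hk])
          (fun b hb => by
            rcases List.mem_append.mp hb with hb | hb
            · simp [h1 b hb, hk]
            · simp [h2 b hb, hk])]
        simp
      rw [List.foldl_cons, this,
        ih (a0 ++ [x]) a1 a2 (fun y hy => hx y (by simp [hy]))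
          (fun b hb => by rcases List.mem_append.mp hb with hb | hb
                          · exact h0 b hb
                          · simpa using (List.mem_singleton.mp hb ▸ hk)) h1 h2]
      simp [List.filter_cons, hk]
    · have : PySem.List.insertBy (fun a b => decide (key a < key b)) x (a0 ++ a1 ++ a2)
          = a0 ++ (a1 ++ [x]) ++ a2 := by
        have := pvInsertBy_append (fun a b => decide (key a < key b)) x (a0 ++ a1) a2
          (fun b hb => by
            rcases List.mem_append.mp hb with hb | hb
            · simp [h0 b hb, hk]
            · simp [h1 b hb, hk])
          (fun b hb => by simp [h2 b hb, hk])
        simp only [List.append_assoc] at this ⊢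
        rw [this]
        simp
      rw [List.foldl_cons, this,
        ih a0 (a1 ++ [x]) a2 (fun y hy => hx y (by simp [hy])) h0
          (fun b hb => by rcases List.mem_append.mp hb with hb | hb
                          · exact h1 b hb
                          · simpa using (List.mem_singleton.mp hb ▸ hk)) h2]
      simp [List.filter_cons, hk]
    · have : PySem.List.insertBy (fun a b => decide (key a < key b)) x (a0 ++ a1 ++ a2)
          = a0 ++ a1 ++ (a2 ++ [x]) := by
        have := pvInsertBy_append (fun a b => decide (key a < key b)) x (a0 ++ a1 ++ a2) []
          (fun b hb => by
            rcases List.mem_append.mp hb with hb | hb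
            · rcases List.mem_append.mp hb with hb | hb
              · simp [h0 b hb, hk]
              · simp [h1 b hb, hk]
            · simp [h2 b hb, hk])
          (by simp)
        simpa using this
      rw [List.foldl_cons, this,
        ih a0 a1 (a2 ++ [x]) (fun y hy => hx y (by simp [hy])) h0 h1
          (fun b hb => by rcases List.mem_append.mp hb with hb | hb
                          · exact h2 b hb
                          · simpa using (List.mem_singleton.mp hb ▸ hk))]
      simp [List.filter_cons, hk]

theorem pvSortedEqBuckets {α : Type} (key : α → Int) (xs : List α)
    (hx : ∀ x ∈ xs, key x = 0 ∨ key x = 1 ∨ key x = 2) :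
    PySem.List.sorted xs key false
      = xs.filter (fun x => key x == 0) ++ xs.filter (fun x => key x == 1) ++ xs.filter (fun x => key x == 2) := by
  rw [PySem.List.sorted_eq_foldl_insertBy]
  have := pvSortedBuckets key xs [] [] [] hx (by simp) (by simp) (by simp)
  simpa using this

theorem pvFoldBucketPush {α : Type} (k : α → Int) (g : α → List (String × String)) :
    ∀ (xs : List α) (b0 b1 b2 : List (List (String × String))),
      (∀ x ∈ xs, k x = 0 ∨ k x = 1 ∨ k x = 2) →
      xs.foldl (fun b req => pvBucketPush b (k req) (g req)) (b0, b1, b2)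
        = (b0 ++ (xs.filter (fun r => k r == 0)).map g,
           b1 ++ (xs.filter (fun r => k r == 1)).map g,
           b2 ++ (xs.filter (fun r => k r == 2)).map g) := by
  intro xs
  induction xs with
  | nil => intro b0 b1 b2 _; simp
  | cons x xs ih =>
    intro b0 b1 b2 hx
    rcases hx x (by simp) with hk | hk | hk
    · have hstep : pvBucketPush (b0, b1, b2) (k x) (g x) = (b0 ++ [g x], b1, b2) := by
        simp [pvBucketPush, hk]
      rw [List.foldl_cons, hstep, ih (b0 ++ [g x]) b1 b2 (fun y hy => hx y (by simp [hy]))]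
      simp [hk]
    · have hstep : pvBucketPush (b0, b1, b2) (k x) (g x) = (b0, b1 ++ [g x], b2) := by
        simp [pvBucketPush, hk]
      rw [List.foldl_cons, hstep, ih b0 (b1 ++ [g x]) b2 (fun y hy => hx y (by simp [hy]))]
      simp [hk]
    · have hstep : pvBucketPush (b0, b1, b2) (k x) (g x) = (b0, b1, b2 ++ [g x]) := by
        simp [pvBucketPush, hk]
      rw [List.foldl_cons, hstep, ih b0 b1 (b2 ++ [g x]) (fun y hy => hx y (by simp [hy]))]
      simp [hk]

theorem pvFoldAppendSingleton {α β : Type} (f : α → β) :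
    ∀ (xs : List α) (acc : List β), xs.foldl (fun a x => a ++ [f x]) acc = acc ++ xs.map f := by
  intro xs
  induction xs with
  | nil => intro acc; simp
  | cons x xs ih => intro acc; simp [List.foldl_cons, ih]

theorem anyA_eq (rds : List (List (String × String))) (R : String) :
    (rds.map (fun req => pvItemA (PySem.Dict.mk req))).any
        (fun e => (PySem.Dict.mk e).getD "requirement" "" == R)
      = rds.any (fun req => (PySem.Dict.mk req).getD "requirement" "" == R) := by
  rw [List.any_map]
  exact PySem.List.any_congr_mem (fun req _ => by simp [Function.comp_def, itemA_req])

theorem containsB_eq (rds : List (List (String × String))) (R : String) :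
    PySem.Set.contains
        (rds.foldl (fun s req => PySem.Set.add s ((PySem.Dict.mk req).getD "requirement" "")) PySem.Set.empty) R
      = rds.any (fun req => (PySem.Dict.mk req).getD "requirement" "" == R) := by
  rw [Bool.eq_iff_iff, PySem.Set.contains_iff, PySem.Set.mem_foldl_add, List.any_eq_true]
  constructor
  · rintro (h | ⟨b, hb, rfl⟩)
    · simp [PySem.Set.empty] at h
    · exact ⟨b, hb, by simp⟩
  · rintro ⟨b, hb, hbe⟩
    exact Or.inr ⟨b, hb, (beq_iff_eq.mp hbe).symm⟩

theorem pvClose (rds : List (List (String × String)))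
    (hk3 : ∀ req ∈ rds, pvRankA ((PySem.Dict.mk req).getD "urgency" "medium") = 0 ∨
        pvRankA ((PySem.Dict.mk req).getD "urgency" "medium") = 1 ∨
        pvRankA ((PySem.Dict.mk req).getD "urgency" "medium") = 2)
    (E : List (List (String × String)))
    (hE : ∀ e ∈ E, pvRankA ((PySem.Dict.mk e).getD "urgency" "medium") = 0 ∨
        pvRankA ((PySem.Dict.mk e).getD "urgency" "medium") = 1 ∨
        pvRankA ((PySem.Dict.mk e).getD "urgency" "medium") = 2) :
    PySem.List.sorted (rds.map (fun req => pvItemA (PySem.Dict.mk req)) ++ E)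
        (fun x => pvRankA ((PySem.Dict.mk x).getD "urgency" "medium")) false
      = ((rds.filter (fun r => pvRankA ((PySem.Dict.mk r).getD "urgency" "medium") == 0)).map (fun req => pvItemA (PySem.Dict.mk req))
          ++ E.filter (fun e => pvRankA ((PySem.Dict.mk e).getD "urgency" "medium") == 0))
        ++ ((rds.filter (fun r => pvRankA ((PySem.Dict.mk r).getD "urgency" "medium") == 1)).map (fun req => pvItemA (PySem.Dict.mk req))
          ++ E.filter (fun e => pvRankA ((PySem.Dict.mk e).getD "urgency" "medium") == 1))
        ++ ((rds.filter (fun r => pvRankA ((PySem.Dict.mk r).getD "urgency" "medium") == 2)).map (fun req => pvItemA (PySem.Dict.mk req))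
          ++ E.filter (fun e => pvRankA ((PySem.Dict.mk e).getD "urgency" "medium") == 2)) := by
  have hall : ∀ x ∈ rds.map (fun req => pvItemA (PySem.Dict.mk req)) ++ E,
      pvRankA ((PySem.Dict.mk x).getD "urgency" "medium") = 0 ∨
      pvRankA ((PySem.Dict.mk x).getD "urgency" "medium") = 1 ∨
      pvRankA ((PySem.Dict.mk x).getD "urgency" "medium") = 2 := by
    intro x hx
    rcases List.mem_append.mp hx with hx | hx
    · obtain ⟨r, hr, rfl⟩ := List.mem_map.mp hx
      simpa [itemA_urg] using hk3 r hr
    · exact hE x hx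
  rw [pvSortedEqBuckets _ _ hall]
  have hfil : ∀ (i : Int),
      (rds.map (fun req => pvItemA (PySem.Dict.mk req))).filter
          (fun x => pvRankA ((PySem.Dict.mk x).getD "urgency" "medium") == i)
        = (rds.filter (fun r => pvRankA ((PySem.Dict.mk r).getD "urgency" "medium") == i)).map
            (fun req => pvItemA (PySem.Dict.mk req)) := by
    intro i
    rw [List.filter_map]
    exact congrArg _ (List.filter_congr (fun r _ => by simp [Function.comp_def, itemA_urg]))
  simp [List.filter_append, hfil]

-- looking up a key other than "status"/"notes" ignores the two appended pairs
theorem getD_aug (e : List (String × String)) (x y k d : String)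
    (h1 : ("status" : String) ≠ k) (h2 : ("notes" : String) ≠ k) :
    (PySem.Dict.mk (e ++ [("status", x), ("notes", y)])).getD k d = (PySem.Dict.mk e).getD k d := by
  induction e with
  | nil => simp [PySem.Dict.getD_eq_get?_getD, PySem.Dict.get?_mk_cons, h1, h2]
  | cons p e ih =>
    obtain ⟨pk, pv⟩ := p
    by_cases hp : (pk == k) = true
    · simp [PySem.Dict.getD_eq_get?_getD, PySem.Dict.get?_mk_cons, hp]
    · have hpb : (pk == k) = false := by simpa using hp
      simpa [PySem.Dict.getD_eq_get?_getD, PySem.Dict.get?_mk_cons, hpb] using ih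

theorem foldl_guard_filter {α β : Type} (c : α → Bool) (step : β → α → β) :
    ∀ (S : List α) (init : β),
      S.foldl (fun b item => if c item then b else step b item) init
        = (S.filter (fun s => !c s)).foldl step init := by
  intro S
  induction S with
  | nil => intro init; rfl
  | cons s S ih =>
    intro init
    by_cases hc : c s = true <;> simp [List.foldl_cons, List.filter_cons, hc, ih]

-- A's dedup loop over the standard items: appends exactly the items whose requirement
-- does not occur in the initial checklist (given the standard requirements are distinct)
theorem stdA_fold :
    ∀ (S : List (List (String × String))) (ch E : List (List (String × String))),
      (S.map (fun s => (PySem.Dict.mk s).getD "requirement" "")).Nodup →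
      (∀ s ∈ S, ∀ e ∈ E,
        (PySem.Dict.mk e).getD "requirement" "" ≠ (PySem.Dict.mk s).getD "requirement" "") →
      S.foldl (fun acc item =>
          if acc.any (fun existing =>
              (PySem.Dict.mk existing).getD "requirement" "" == (PySem.Dict.mk item).getD "requirement" "") then
            acc
          else acc ++ [item ++ [("status", "pending"), ("notes", "Standard procedural requirement")]])
        (ch ++ E)
      = ch ++ E ++ (S.filter (fun s => !(ch.any (fun existing =>
          (PySem.Dict.mk existing).getD "requirement" "" == (PySem.Dict.mk s).getD "requirement" "")))).map
            (fun s => s ++ [("status", "pending"), ("notes", "Standard procedural requirement")]) := by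
  intro S
  induction S with
  | nil => intro ch E _ _; simp
  | cons s S ih =>
    intro ch E hnd hdisj
    have hEany : (E.any (fun e =>
        (PySem.Dict.mk e).getD "requirement" "" == (PySem.Dict.mk s).getD "requirement" "")) = false := by
      rw [List.any_eq_false]
      intro e he
      simpa using hdisj s (by simp) e he
    rw [List.foldl_cons, List.any_append, hEany, Bool.or_false]
    by_cases hc : (ch.any (fun existing =>
        (PySem.Dict.mk existing).getD "requirement" "" == (PySem.Dict.mk s).getD "requirement" "")) = true
    · rw [if_pos hc, ih ch E (by simpa using hnd.of_cons)
        (fun s' hs' e he => hdisj s' (by simp [hs']) e he)]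
      simp [List.filter_cons, hc]
    · rw [if_neg hc, List.append_assoc ch E]
      rw [ih ch (E ++ [s ++ [("status", "pending"), ("notes", "Standard procedural requirement")]])
        (by simpa using hnd.of_cons)
        (fun s' hs' e he => by
          rcases List.mem_append.mp he with he | he
          · exact hdisj s' (by simp [hs']) e he
          · rw [List.mem_singleton.mp he]
            rw [getD_aug s "pending" "Standard procedural requirement" "requirement" "" (by decide) (by decide)]
            have hne : (PySem.Dict.mk s).getD "requirement" "" ∉
                S.map (fun t => (PySem.Dict.mk t).getD "requirement" "") := by
              have := hnd
              simp only [List.map_cons, List.nodup_cons] at this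
              exact this.1
            intro hcontra
            exact hne (hcontra ▸ List.mem_map_of_mem hs'))]
      have hcb : (ch.any (fun existing =>
          (PySem.Dict.mk existing).getD "requirement" "" == (PySem.Dict.mk s).getD "requirement" "")) = false := by
        revert hc
        cases ch.any (fun existing =>
          (PySem.Dict.mk existing).getD "requirement" "" == (PySem.Dict.mk s).getD "requirement" "") <;> simp
      simp [List.filter_cons, hcb, List.append_assoc]

theorem stdA_fold0 (S ch : List (List (String × String)))
    (hnd : (S.map (fun s => (PySem.Dict.mk s).getD "requirement" "")).Nodup) :
    S.foldl (fun acc item =>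
        if acc.any (fun existing =>
            (PySem.Dict.mk existing).getD "requirement" "" == (PySem.Dict.mk item).getD "requirement" "") then
          acc
        else acc ++ [item ++ [("status", "pending"), ("notes", "Standard procedural requirement")]]) ch
      = ch ++ (S.filter (fun s => !(ch.any (fun existing =>
          (PySem.Dict.mk existing).getD "requirement" "" == (PySem.Dict.mk s).getD "requirement" "")))).map
            (fun s => s ++ [("status", "pending"), ("notes", "Standard procedural requirement")]) := by
  have := stdA_fold S ch [] hnd (by simp)
  simpa using this

-- ===== VERDICT (by name: the statement is the Claim_ definition above) =====
theorem generate_procedural_checklist_py_spec : Claim_equal_generate_procedural_checklist_py := by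
  intro cf hdom hpre
  unfold Spec_generate_procedural_checklist_py
  simp only [generate_procedural_checklist_py, generate_procedural_checklist_py_alt,
    rankB_eq, itemB_eq, stdB_eq]
  rw [PySem.List.foldl_prod_mk
      (f := fun b req => pvBucketPush b (pvRankA ((PySem.Dict.mk req).getD "urgency" "medium")) (pvItemA (PySem.Dict.mk req)))
      (g := fun s req => PySem.Set.add s ((PySem.Dict.mk req).getD "requirement" ""))]
  dsimp only
  set rds := (PySem.Dict.mk cf).getD "procedural_checklist" [] with hrds
  have hk3 : ∀ req ∈ rds, pvRankA ((PySem.Dict.mk req).getD "urgency" "medium") = 0 ∨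
      pvRankA ((PySem.Dict.mk req).getD "urgency" "medium") = 1 ∨
      pvRankA ((PySem.Dict.mk req).getD "urgency" "medium") = 2 := by
    intro req h
    have := hpre req h
    simp only [List.mem_cons, List.not_mem_nil, or_false] at this
    rcases this with h' | h' | h' <;> rw [h'] <;> simp [rankA_high, rankA_medium, rankA_low]
  simp only [pvFoldAppendSingleton, List.nil_append]
  rw [pvFoldBucketPush _ _ rds [] [] [] hk3]
  simp only [List.nil_append]
  rw [foldl_guard_filter]
  rw [List.filter_congr (fun s (_ : s ∈ pvStdA) => congrArg Bool.not (containsB_eq rds ((PySem.Dict.mk s).getD "requirement" "")))]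
  rw [stdA_fold0 pvStdA (rds.map fun req => pvItemA (PySem.Dict.mk req)) (by decide)]
  rw [List.filter_congr (fun s (_ : s ∈ pvStdA) => congrArg Bool.not (anyA_eq rds ((PySem.Dict.mk s).getD "requirement" "")))]
  have hstdkeys : ∀ s ∈ pvStdA, pvRankA ((PySem.Dict.mk s).getD "urgency" "medium") = 0 ∨
      pvRankA ((PySem.Dict.mk s).getD "urgency" "medium") = 1 ∨
      pvRankA ((PySem.Dict.mk s).getD "urgency" "medium") = 2 := by decide
  have hkf : ∀ s ∈ pvStdA.filter (fun s => !(rds.any (fun req =>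
      (PySem.Dict.mk req).getD "requirement" "" == (PySem.Dict.mk s).getD "requirement" ""))),
      pvRankA ((PySem.Dict.mk s).getD "urgency" "medium") = 0 ∨
      pvRankA ((PySem.Dict.mk s).getD "urgency" "medium") = 1 ∨
      pvRankA ((PySem.Dict.mk s).getD "urgency" "medium") = 2 :=
    fun s hs => hstdkeys s (List.mem_of_mem_filter hs)
  rw [pvFoldBucketPush _ _ _ _ _ _ hkf]
  have hE : ∀ e ∈ (pvStdA.filter (fun s => !(rds.any (fun req =>
      (PySem.Dict.mk req).getD "requirement" "" == (PySem.Dict.mk s).getD "requirement" "")))).map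
        (fun s => s ++ [("status", "pending"), ("notes", "Standard procedural requirement")]),
      pvRankA ((PySem.Dict.mk e).getD "urgency" "medium") = 0 ∨
      pvRankA ((PySem.Dict.mk e).getD "urgency" "medium") = 1 ∨
      pvRankA ((PySem.Dict.mk e).getD "urgency" "medium") = 2 := by
    intro e he
    obtain ⟨s, hs, rfl⟩ := List.mem_map.mp he
    rw [getD_aug s "pending" "Standard procedural requirement" "urgency" "medium" (by decide) (by decide)]
    exact hkf s hs
  rw [pvClose rds hk3 _ hE]
  have hfe : ∀ (i : Int),
      ((pvStdA.filter (fun s => !(rds.any (fun req =>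
          (PySem.Dict.mk req).getD "requirement" "" == (PySem.Dict.mk s).getD "requirement" "")))).map
            (fun s => s ++ [("status", "pending"), ("notes", "Standard procedural requirement")])).filter
          (fun e => pvRankA ((PySem.Dict.mk e).getD "urgency" "medium") == i)
        = ((pvStdA.filter (fun s => !(rds.any (fun req =>
            (PySem.Dict.mk req).getD "requirement" "" == (PySem.Dict.mk s).getD "requirement" "")))).filter
              (fun s => pvRankA ((PySem.Dict.mk s).getD "urgency" "medium") == i)).map
            (fun s => s ++ [("status", "pending"), ("notes", "Standard procedural requirement")]) := by
    intro i
    rw [List.filter_map]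
    exact congrArg _ (List.filter_congr (fun r _ => by
      simp [Function.comp_def,
        getD_aug r "pending" "Standard procedural requirement" "urgency" "medium" (by decide) (by decide)]))
  simp [hfe, List.append_assoc]
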